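-- pv_equiv track=rewrite | github.com/tatsu1207/MST_tool | scripts/get_v4_from_all.py | find_primer
-- ===== SOURCE A (Python) =====
-- from typing import Optional
--
-- IUPAC = {
--     "A":{"A"}, "C":{"C"}, "G":{"G"}, "T":{"T"},
--     "R":{"A","G"}, "Y":{"C","T"}, "S":{"G","C"}, "W":{"A","T"},
--     "K":{"G","T"}, "M":{"A","C"},
--     "B":{"C","G","T"}, "D":{"A","G","T"}, "H":{"A","C","T"}, "V":{"A","C","G"},
--     "N":{"A","C","G","T"},
-- }
--
-- def find_primer(seq: str, primer: str, max_mm: int, search_range: Optional[int] = None) -> int: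
--     """
--     Slide primer over seq[0 : search_range] and return the START index of the
--     best match if it has <= max_mm mismatches.  Returns -1 if not found.
--
--     search_range=None  → scan the whole read.
--     """
--     p_len = len(primer)
--     limit = (len(seq) - p_len + 1) if search_range is None else min(search_range, len(seq) - p_len + 1)
--
--     best_pos = -1
--     best_mm  = max_mm + 1          # lower is better
--
--     for start in range(limit):
--         mm = 0
--         for i in range(p_len):
--             if seq[start + i].upper() not in IUPAC.get(primer[i].upper(), set()):
--                 mm += 1
--                 if mm >= best_mm:   # already worse than current best → skip
--                     break
--         if mm < best_mm:
--             best_mm  = mm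
--             best_pos = start
--             if mm == 0:             # perfect match → no need to keep scanning
--                 break
--
--     return best_pos if best_mm <= max_mm else -1
-- ===== SOURCE B (Python) =====
-- from typing import Optional
--
-- IUPAC = {
--     "A":{"A"}, "C":{"C"}, "G":{"G"}, "T":{"T"},
--     "R":{"A","G"}, "Y":{"C","T"}, "S":{"G","C"}, "W":{"A","T"},
--     "K":{"G","T"}, "M":{"A","C"},
--     "B":{"C","G","T"}, "D":{"A","G","T"}, "H":{"A","C","T"}, "V":{"A","C","G"},
--     "N":{"A","C","G","T"},
-- }
--
-- def find_primer(seq: str, primer: str, max_mm: int, search_range: Optional[int] = None) -> int: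
--     """Column-wise rewrite: build the full mismatch-count table for every start
--     position (one pass per primer base, no per-window state, no early exits),
--     then the answer is the first position of the minimal count, if small enough."""
--     p_len = len(primer)
--     limit = len(seq) - p_len + 1
--     if search_range is not None:
--         limit = min(search_range, limit)
--     if limit <= 0:
--         return -1
--     su = seq.upper()
--     counts = [0] * limit
--     for i, pc in enumerate(primer):
--         allowed = IUPAC.get(pc.upper(), set())
--         for start in range(limit):
--             if su[start + i] not in allowed:
--                 counts[start] += 1
--     best = min(counts)
--     return counts.index(best) if best <= max_mm else -1
-- ===== Notes on version B (the rewrite author's own statement) =====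
-- stated objective: alternative
-- what changed: A slides the primer window with a running best and two early-exit breaks; B builds the full mismatch-count table column-wise (one pass per primer base over all start positions), then answers with min() and list.index() of the first minimal count.
import Mathlib
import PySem

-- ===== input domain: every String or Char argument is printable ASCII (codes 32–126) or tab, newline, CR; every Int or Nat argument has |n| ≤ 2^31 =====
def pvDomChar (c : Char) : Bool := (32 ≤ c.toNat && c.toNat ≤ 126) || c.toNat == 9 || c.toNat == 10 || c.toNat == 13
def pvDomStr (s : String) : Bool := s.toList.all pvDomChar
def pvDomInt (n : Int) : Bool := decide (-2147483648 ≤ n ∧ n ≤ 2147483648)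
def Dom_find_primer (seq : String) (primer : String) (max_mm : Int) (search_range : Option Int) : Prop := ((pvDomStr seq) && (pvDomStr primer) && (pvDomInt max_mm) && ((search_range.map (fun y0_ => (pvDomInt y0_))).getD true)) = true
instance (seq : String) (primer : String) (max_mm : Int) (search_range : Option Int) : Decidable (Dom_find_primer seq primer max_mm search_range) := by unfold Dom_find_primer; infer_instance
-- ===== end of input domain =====

-- B replaces A's windowed scan with early-exit running best by a column-wise mismatch-count
-- table followed by min/index (objective: alternative; same asymptotic cost, no speed claim).


-- ===== PORT A =====
-- Shared module context: the IUPAC dict of the Python module (sets of 1-char strings → PySem.Set Char; exact on ASCII).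
def pvIUPAC : PySem.Dict Char (PySem.Set Char) := PySem.Dict.ofList
  [('A', ['A']), ('C', ['C']), ('G', ['G']), ('T', ['T']),
   ('R', ['A','G']), ('Y', ['C','T']), ('S', ['G','C']), ('W', ['A','T']),
   ('K', ['G','T']), ('M', ['A','C']),
   ('B', ['C','G','T']), ('D', ['A','G','T']), ('H', ['A','C','T']), ('V', ['A','C','G']),
   ('N', ['A','C','G','T'])]

-- IUPAC.get(c, set())
def pvIUPACget (c : Char) : List Char := (PySem.Dict.get? pvIUPAC c).getD []

-- seq[start + i].upper() not in IUPAC.get(primer[i].upper(), set())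
-- (both indices are produced by the ranges, hence always in bounds; getD is exact there)
def pvMismA (s p : List Char) (start i : Nat) : Bool :=
  !((pvIUPACget (PySem.Chars.upperChar (p.getD i ' '))).contains
      (PySem.Chars.upperChar (s.getD (start + i) ' ')))

-- inner 'for i in range(p_len)' with 'mm += 1; if mm >= best_mm: break'
def pvInnerA (s p : List Char) (start : Nat) (bestMm : Int) : List Nat → Int → Int
  | [], mm => mm
  | i :: rest, mm =>
    if pvMismA s p start i then
      (if bestMm ≤ mm + 1 then mm + 1 else pvInnerA s p start bestMm rest (mm + 1))
    else pvInnerA s p start bestMm rest mm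

-- outer 'for start in range(limit)' with state (best_pos, best_mm) and the 'mm == 0' break
def pvOuterA (s p : List Char) : List Nat → Int × Int → Int × Int
  | [], st => st
  | start :: rest, (bp, bm) =>
    let mm := pvInnerA s p start bm (List.range p.length) 0
    if mm < bm then
      (if mm = 0 then ((start : Int), mm) else pvOuterA s p rest ((start : Int), mm))
    else pvOuterA s p rest (bp, bm)

def find_primer (seq : String) (primer : String) (max_mm : Int) (search_range : Option Int) : Int :=
  let s := seq.toList
  let p := primer.toList
  let pLen : Int := p.length
  let limit : Int := match search_range with
    | none => (s.length : Int) - pLen + 1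
    | some r => min r ((s.length : Int) - pLen + 1)
  -- range(limit) : empty for limit ≤ 0, exactly List.range limit.toNat
  let res := pvOuterA s p (List.range limit.toNat) (-1, max_mm + 1)
  if res.2 ≤ max_mm then res.1 else -1

-- ===== PORT B =====
-- su[start + i] not in IUPAC.get(pc.upper(), set())   (su already upper-cased)
def pvMismB (su : List Char) (start i : Nat) (pc : Char) : Bool :=
  !((pvIUPACget (PySem.Chars.upperChar pc)).contains (su.getD (start + i) ' '))

def find_primer_alt (seq : String) (primer : String) (max_mm : Int) (search_range : Option Int) : Int :=
  let p := primer.toList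
  let limit0 : Int := (seq.toList.length : Int) - (p.length : Int) + 1
  let limit : Int := match search_range with
    | none => limit0
    | some r => min r limit0
  if limit ≤ 0 then -1
  else
    let n := limit.toNat
    let su := PySem.Chars.upper seq.toList
    -- for i, pc in enumerate(primer): for start in range(limit): counts[start] += …
    let counts : List Int :=
      (PySem.List.enumerate p).foldl
        (fun cnts ip =>
          cnts.mapIdx (fun start c => if pvMismB su start ip.1.toNat ip.2 then c + 1 else c))
        (List.replicate n 0)
    let best : Int := (PySem.List.min? counts (fun x => x)).getD 0   -- counts ≠ [], min() total here
    if best ≤ max_mm then ((PySem.List.index? counts best).getD 0 : Int) else -1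

-- ===== PRECONDITION & SPEC =====
def Spec_find_primer (seq : String) (primer : String) (max_mm : Int) (search_range : Option Int) (out : Int) : Prop := out = find_primer_alt seq primer max_mm search_range
instance (seq : String) (primer : String) (max_mm : Int) (search_range : Option Int) (out : Int) : Decidable (Spec_find_primer seq primer max_mm search_range out) := by unfold Spec_find_primer; infer_instance

-- ===== CLAIM (what is proved, stated in full; the proofs are below) =====
def Claim_equal_find_primer : Prop := ∀ (seq : String) (primer : String) (max_mm : Int) (search_range : Option Int), Dom_find_primer seq primer max_mm search_range → Spec_find_primer seq primer max_mm search_range (find_primer seq primer max_mm search_range)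

-- ===== LEMMAS AND PROOFS =====

-- full mismatch count of the window at `start`, over a list of primer indices
def pvCntL (s p : List Char) (start : Nat) : List Nat → Int
  | [] => 0
  | i :: r => (if pvMismA s p start i then 1 else 0) + pvCntL s p start r

def pvCnt (s p : List Char) (start : Nat) : Int := pvCntL s p start (List.range p.length)

-- A's outer loop without breaks and with full counts (running strict minimum)
def pvRef (s p : List Char) : List Nat → Int × Int → Int × Int
  | [], st => st
  | j :: rest, (bp, bm) =>
    if pvCnt s p j < bm then pvRef s p rest ((j : Int), pvCnt s p j)
    else pvRef s p rest (bp, bm)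

-- first element of L whose count is m
def pvFirst (s p : List Char) (m : Int) : List Nat → Int
  | [] => -1
  | j :: r => if pvCnt s p j = m then (j : Int) else pvFirst s p m r

theorem pvCntL_nonneg (s p : List Char) (start : Nat) (L : List Nat) :
    0 ≤ pvCntL s p start L := by
  induction L with
  | nil => simp [pvCntL]
  | cons j r ih => simp only [pvCntL]; split <;> omega

theorem pvCnt_nonneg (s p : List Char) (start : Nat) : 0 ≤ pvCnt s p start :=
  pvCntL_nonneg s p start _

theorem pvInnerA_spec (s p : List Char) (start : Nat) (bm : Int) (L : List Nat) :
    ∀ mm : Int, (mm + pvCntL s p start L < bm → pvInnerA s p start bm L mm = mm + pvCntL s p start L)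
      ∧ (bm ≤ mm + pvCntL s p start L → bm ≤ pvInnerA s p start bm L mm) := by
  induction L with
  | nil =>
    intro mm
    refine ⟨fun _ => by simp [pvInnerA, pvCntL], fun h => ?_⟩
    simp only [pvCntL, add_zero] at h
    simpa [pvInnerA] using h
  | cons j r ih =>
    intro mm
    have hr := pvCntL_nonneg s p start r
    by_cases hm : pvMismA s p start j = true
    · have ec : pvCntL s p start (j :: r) = 1 + pvCntL s p start r := by simp [pvCntL, hm]
      have e : pvInnerA s p start bm (j :: r) mm
          = if bm ≤ mm + 1 then mm + 1 else pvInnerA s p start bm r (mm + 1) := by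
        simp [pvInnerA, hm]
      rw [ec, e]
      by_cases hb : bm ≤ mm + 1
      · rw [if_pos hb]
        exact ⟨fun h => by omega, fun _ => hb⟩
      · rw [if_neg hb]
        have h1 := (ih (mm + 1)).1
        have h2 := (ih (mm + 1)).2
        refine ⟨fun h => ?_, fun h => ?_⟩
        · rw [h1 (by omega)]; ring
        · exact h2 (by omega)
    · have ec : pvCntL s p start (j :: r) = pvCntL s p start r := by simp [pvCntL, hm]
      have e : pvInnerA s p start bm (j :: r) mm = pvInnerA s p start bm r mm := by
        simp [pvInnerA, hm]
      rw [ec, e]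
      exact ih mm

theorem pvRef_stuck (s p : List Char) (L : List Nat) (bp bm : Int) (h : bm ≤ 0) :
    pvRef s p L (bp, bm) = (bp, bm) := by
  induction L with
  | nil => rfl
  | cons j r ih =>
    have := pvCnt_nonneg s p j
    simp only [pvRef]
    rw [if_neg (by omega)]
    exact ih

theorem pvOuterA_eq_ref (s p : List Char) (L : List Nat) :
    ∀ bp bm : Int, pvOuterA s p L (bp, bm) = pvRef s p L (bp, bm) := by
  induction L with
  | nil => intro bp bm; rfl
  | cons j r ih =>
    intro bp bm
    have hspec := pvInnerA_spec s p j bm (List.range p.length) 0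
    have hc0 : (0 : Int) + pvCntL s p j (List.range p.length) = pvCnt s p j := by
      simp [pvCnt]
    have eo : pvOuterA s p (j :: r) (bp, bm)
        = (if pvInnerA s p j bm (List.range p.length) 0 < bm then
            (if pvInnerA s p j bm (List.range p.length) 0 = 0 then
              ((j : Int), pvInnerA s p j bm (List.range p.length) 0)
             else pvOuterA s p r ((j : Int), pvInnerA s p j bm (List.range p.length) 0))
           else pvOuterA s p r (bp, bm)) := rfl
    rw [eo]
    simp only [pvRef]
    by_cases hlt : pvCnt s p j < bm
    · have hval : pvInnerA s p j bm (List.range p.length) 0 = pvCnt s p j := by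
        rw [hspec.1 (by omega), hc0]
      rw [hval, if_pos hlt, if_pos hlt]
      by_cases hz : pvCnt s p j = 0
      · rw [if_pos hz, hz, pvRef_stuck s p r _ 0 le_rfl]
      · rw [if_neg hz, ih]
    · have hge : bm ≤ pvInnerA s p j bm (List.range p.length) 0 :=
        hspec.2 (by omega)
      rw [if_neg (by omega), if_neg hlt, ih]

-- running minimum of the counts over L, seeded with a
def pvMin (s p : List Char) (L : List Nat) (a : Int) : Int :=
  L.foldl (fun acc j => min acc (pvCnt s p j)) a

theorem pvMin_le (s p : List Char) (L : List Nat) (a : Int) : pvMin s p L a ≤ a := by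
  induction L generalizing a with
  | nil => simp [pvMin]
  | cons j r ih =>
    simp only [pvMin, List.foldl]
    exact le_trans (ih _) (by omega)

theorem pvMin_min (s p : List Char) (L : List Nat) (a b : Int) :
    pvMin s p L (min a b) = min a (pvMin s p L b) := by
  induction L generalizing a b with
  | nil => simp [pvMin]
  | cons j r ih =>
    simp only [pvMin, List.foldl] at *
    rw [min_assoc, ih]

theorem pvRef_char (s p : List Char) (L : List Nat) :
    ∀ bp bm : Int, pvRef s p L (bp, bm) =
      (if pvMin s p L bm < bm then pvFirst s p (pvMin s p L bm) L else bp, pvMin s p L bm) := by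
  induction L with
  | nil => intro bp bm; simp [pvRef, pvMin]
  | cons j r ih =>
    intro bp bm
    have hM : pvMin s p (j :: r) bm = pvMin s p r (min bm (pvCnt s p j)) := rfl
    simp only [pvRef, pvFirst, hM]
    by_cases hlt : pvCnt s p j < bm
    · rw [if_pos hlt, ih, min_eq_right (le_of_lt hlt)]
      have hle : pvMin s p r (pvCnt s p j) ≤ pvCnt s p j := pvMin_le _ _ _ _
      by_cases heq : pvMin s p r (pvCnt s p j) < pvCnt s p j
      · rw [if_pos heq, if_pos (show pvMin s p r (pvCnt s p j) < bm by omega),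
            if_neg (show ¬ pvCnt s p j = pvMin s p r (pvCnt s p j) by omega)]
      · have he : pvMin s p r (pvCnt s p j) = pvCnt s p j := by omega
        rw [if_neg heq, if_pos (show pvMin s p r (pvCnt s p j) < bm by omega), if_pos he.symm]
    · rw [if_neg hlt, ih, min_eq_left (by omega)]
      by_cases hlt2 : pvMin s p r bm < bm
      · rw [if_pos hlt2, if_pos hlt2, if_neg (show ¬ pvCnt s p j = pvMin s p r bm by omega)]
      · rw [if_neg hlt2, if_neg hlt2]

-- ==== B side ====

theorem pvUpper_getD (l : List Char) (k : Nat) :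
    (PySem.Chars.upper l).getD k ' ' = PySem.Chars.upperChar (l.getD k ' ') := by
  have hmap : PySem.Chars.upper l = l.map PySem.Chars.upperChar := by
    simp [PySem.Chars.upper]
  rw [hmap]
  rcases h : l[k]? with _ | a
  · simp [List.getD, h]; decide
  · simp [List.getD, h]

theorem pvMism_agree (s p : List Char) (start i : Nat) :
    pvMismB (PySem.Chars.upper s) start i (p.getD i ' ') = pvMismA s p start i := by
  unfold pvMismA pvMismB
  rw [pvUpper_getD]

theorem pvMapIdx_map_range (n : Nat) (f : Nat → Int) (g : Nat → Int → Int) :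
    List.mapIdx g ((List.range n).map f) = (List.range n).map (fun st => g st (f st)) := by
  apply List.ext_getElem
  · simp
  · intro k h1 h2
    simp [List.getElem_mapIdx]

def pvColCnt (su : List Char) (start : Nat) : List (Int × Char) → Int
  | [] => 0
  | ip :: r => (if pvMismB su start ip.1.toNat ip.2 then 1 else 0) + pvColCnt su start r

theorem pvFold_counts (su : List Char) (n : Nat) (E : List (Int × Char)) :
    ∀ f : Nat → Int,
      E.foldl (fun cnts ip =>
          cnts.mapIdx (fun start c => if pvMismB su start ip.1.toNat ip.2 then c + 1 else c))
        ((List.range n).map f)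
      = (List.range n).map (fun st => f st + pvColCnt su st E) := by
  induction E with
  | nil => intro f; simp [pvColCnt]
  | cons ip r ih =>
    intro f
    simp only [List.foldl, pvColCnt]
    rw [pvMapIdx_map_range, ih]
    apply List.map_congr_left
    intro st _
    split <;> ring

theorem pvColCnt_enum (s p : List Char) (start : Nat) :
    ∀ L : List Nat,
      pvColCnt (PySem.Chars.upper s) start (L.map (fun (j : Nat) => ((j : Int), p.getD j ' ')))
        = pvCntL s p start L := by
  intro L
  induction L with
  | nil => rfl
  | cons j r ih =>
    simp only [List.map, pvColCnt, pvCntL, ih]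
    congr 1
    have : ((j : Int)).toNat = j := Int.toNat_natCast j
    rw [this, pvMism_agree]

theorem pvCounts_eq (s p : List Char) (n : Nat) :
    (PySem.List.enumerate p).foldl
        (fun cnts ip =>
          cnts.mapIdx (fun start c =>
            if pvMismB (PySem.Chars.upper s) start ip.1.toNat ip.2 then c + 1 else c))
        (List.replicate n 0)
      = (List.range n).map (fun st => pvCnt s p st) := by
  have hrep : (List.replicate n (0 : Int)) = (List.range n).map (fun _ => (0 : Int)) := by
    simp [List.map_const']
  have henum : PySem.List.enumerate p
      = (List.range p.length).map (fun (j : Nat) => ((j : Int), p.getD j ' ')) := by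
    rw [PySem.List.enumerate_eq_map_pyRange p ' ', PySem.List.len_eq,
        PySem.List.pyRange_zero_natCast, List.map_map]
    apply List.map_congr_left
    intro j _
    simp
  rw [hrep, pvFold_counts, henum]
  apply List.map_congr_left
  intro st _
  rw [pvColCnt_enum]
  simp [pvCnt]

theorem pvFirst_index (s p : List Char) (m : Int) (L : List Nat)
    (hm : m ∈ L.map (pvCnt s p)) :
    (PySem.List.index? (L.map (pvCnt s p)) m).map (fun k => ((L.getD k 0 : Nat) : Int))
      = some (pvFirst s p m L) := by
  induction L with
  | nil => simp at hm
  | cons j r ih =>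
    simp only [List.map, pvFirst]
    by_cases h : pvCnt s p j = m
    · rw [h, PySem.List.index?_cons_self]
      simp [List.getD]
    · rw [PySem.List.index?_cons_of_ne _ h, if_neg h]
      have hm' : m ∈ r.map (pvCnt s p) := by
        simp only [List.map, List.mem_cons] at hm
        rcases hm with h1 | h1
        · exact absurd h1.symm h
        · exact h1
      rw [← ih hm']
      rcases hk : PySem.List.index? (r.map (pvCnt s p)) m with _ | k
      · rw [PySem.List.index?_eq_none_iff] at hk
        exact absurd hm' hk
      · simp [List.getD]

theorem pvMin_eq_foldl (s p : List Char) (L : List Nat) (a : Int) :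
    pvMin s p L a = (L.map (pvCnt s p)).foldl min a := by
  simp [pvMin, List.foldl_map]

-- the whole pipeline, on the list level
theorem pv_main (s p : List Char) (max_mm : Int) (limit : Int) :
    (let res := pvOuterA s p (List.range limit.toNat) (-1, max_mm + 1)
     if res.2 ≤ max_mm then res.1 else -1)
    = (if limit ≤ 0 then -1
       else
        let n := limit.toNat
        let counts : List Int :=
          (PySem.List.enumerate p).foldl
            (fun cnts ip =>
              cnts.mapIdx (fun start c =>
                if pvMismB (PySem.Chars.upper s) start ip.1.toNat ip.2 then c + 1 else c))
            (List.replicate n 0)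
        let best : Int := (PySem.List.min? counts (fun x => x)).getD 0
        if best ≤ max_mm then ((PySem.List.index? counts best).getD 0 : Int) else -1) := by
  simp only [pvOuterA_eq_ref, pvRef_char, pvCounts_eq]
  by_cases hlim : limit ≤ 0
  · rw [if_pos hlim]
    have h0 : limit.toNat = 0 := by omega
    rw [h0]
    have hx : ¬ (max_mm + 1 ≤ max_mm) := by omega
    simp [pvMin, hx]
  · rw [if_neg hlim]
    obtain ⟨m, hn⟩ : ∃ m, limit.toNat = m + 1 := ⟨limit.toNat - 1, by omega⟩
    rw [hn, List.range_succ_eq_map, List.map_cons, PySem.List.min?_id_cons, Option.getD_some]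
    set bm := max_mm + 1 with hbm
    set c0 := pvCnt s p 0 with hc0
    set tl : List Int := ((List.range m).map Nat.succ).map (pvCnt s p) with htl
    set best := tl.foldl min c0 with hbest
    have hminL : pvMin s p (0 :: (List.range m).map Nat.succ) bm = min bm best := by
      rw [hbest, htl, hc0]
      have h1 : pvMin s p (0 :: (List.range m).map Nat.succ) bm
          = pvMin s p ((List.range m).map Nat.succ) (min bm (pvCnt s p 0)) := rfl
      rw [h1, pvMin_min, pvMin_eq_foldl]
    rw [hminL]
    by_cases hle : best ≤ max_mm
    · rw [if_pos hle]
      have hminb : min bm best = best := by omega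
      rw [if_pos (by omega), hminb]
      have hmem : best ∈ (0 :: (List.range m).map Nat.succ).map (pvCnt s p) := by
        rw [List.map_cons, ← hc0, ← htl]
        exact List.min?_mem rfl
      have hfi := pvFirst_index s p best (0 :: (List.range m).map Nat.succ) hmem
      rcases hk : PySem.List.index?
          ((0 :: (List.range m).map Nat.succ).map (pvCnt s p)) best with _ | k
      · rw [hk] at hfi; simp at hfi
      · rw [hk] at hfi
        simp only [Option.map_some, Option.some.injEq] at hfi
        have hk' : PySem.List.index? (c0 :: tl) best = some k := by
          rw [hc0, htl, ← List.map_cons]; exact hk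
        rw [if_pos (show best < bm by omega), hk', Option.getD_some, ← hfi]
        obtain ⟨hklen, -⟩ := PySem.List.getElem_of_index?_eq_some hk
        have hklen' : k < m + 1 := by simpa using hklen
        congr 1
        rw [← List.range_succ_eq_map]
        simp [List.getD, hklen']
    · rw [if_neg hle]
      rw [if_neg (by omega)]

-- ===== VERDICT (by name: the statement is the Claim_ definition above) =====
theorem find_primer_spec : Claim_equal_find_primer := by
  intro seq primer max_mm search_range _
  unfold Spec_find_primer find_primer find_primer_alt
  have := pv_main seq.toList primer.toList max_mm
    (match search_range with
      | none => (seq.toList.length : Int) - (primer.toList.length : Int) + 1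
      | some r => min r ((seq.toList.length : Int) - (primer.toList.length : Int) + 1))
  rcases search_range with _ | r <;> simpa using this
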